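-- pv_equiv track=rewrite | github.com/preetamozarde3/text_processing | text_processing.py | round_brackets
-- ===== SOURCE A (Python) =====
-- def round_brackets(string_to_process):
--     fls = []
--     flag = False
--     processed_string = ""
--     for char in string_to_process:
--         if char == "(":
--             flag = True
--         if char == ")" and flag:
--             flag = False
--             if processed_string not in phenomena:
--                 fls.append(processed_string)
--             processed_string = ""
--         if flag and char != "(":
--             processed_string = processed_string + char
--     return fls
--
-- phenomena = ["ppb", "ppc", "ppl", "ppo"]
-- ===== SOURCE B (Python) =====
-- phenomena = ["ppb", "ppc", "ppl", "ppo"]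
--
-- def round_brackets(string_to_process):
--     # Nested-scan parser: jump to each '(', then collect chars (skipping any
--     # inner '(') until the next ')'; emit the capture unless it is a phenomenon.
--     res = []
--     s = string_to_process
--     n = len(s)
--     i = 0
--     while i < n:
--         if s[i] != '(':
--             i += 1
--             continue
--         j = i + 1
--         cap = []
--         while j < n and s[j] != ')':
--             if s[j] != '(':
--                 cap.append(s[j])
--             j += 1
--         if j < n:
--             cap_s = ''.join(cap)
--             if cap_s not in phenomena:
--                 res.append(cap_s)
--         i = j + 1
--     return res
-- ===== Notes on version B (the rewrite author's own statement) =====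
-- stated objective: alternative
-- what changed: Replaces A's single-pass boolean-flag state machine (flag + cross-iteration string accumulator) with a nested two-level scan: skip forward to each '(', then an inner scan collects the capture up to the next ')' and emits it unless it is a phenomenon.
import Mathlib
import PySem

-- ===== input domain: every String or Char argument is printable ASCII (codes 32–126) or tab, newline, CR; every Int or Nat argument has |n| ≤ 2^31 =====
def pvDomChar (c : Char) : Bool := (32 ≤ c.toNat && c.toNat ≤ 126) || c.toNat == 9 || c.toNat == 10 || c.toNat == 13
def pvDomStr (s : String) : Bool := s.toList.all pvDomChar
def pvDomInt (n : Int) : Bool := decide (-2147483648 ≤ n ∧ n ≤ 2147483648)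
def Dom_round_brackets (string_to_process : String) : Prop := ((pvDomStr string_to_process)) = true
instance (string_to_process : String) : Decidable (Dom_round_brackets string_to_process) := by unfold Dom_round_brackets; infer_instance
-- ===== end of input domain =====

-- B replaces A's boolean-flag state machine with a nested scan (skip to '(',
-- collect until ')'): a different decomposition of the same O(n) pass ('alternative').

-- ===== PORT A =====
def phenomena : List String := ["ppb", "ppc", "ppl", "ppo"]

-- one iteration of A's for-loop; state = (fls, flag, processed_string as List Char)
def rbStep (st : List String × Bool × List Char) (char : Char) : List String × Bool × List Char :=
  let fls := st.1
  let flag := st.2.1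
  let ps := st.2.2
  let flag := if char = '(' then true else flag
  let s2 : List String × Bool × List Char :=
    if char = ')' ∧ flag then
      ((if String.ofList ps ∈ phenomena then fls else fls ++ [String.ofList ps]), false, [])
    else (fls, flag, ps)
  let ps2 := if s2.2.1 ∧ char ≠ '(' then s2.2.2 ++ [char] else s2.2.2
  (s2.1, s2.2.1, ps2)

def round_brackets (string_to_process : String) : List String :=
  (string_to_process.toList.foldl rbStep ([], false, [])).1

-- ===== PORT B =====
-- outer while-loop of Source B: skip chars until '(', then hand over to the inner scan
-- inner while-loop of Source B: collect non-'(' chars into cap until ')' (or the end)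
mutual
def rbOuter : List Char → List String
  | [] => []
  | c :: rest => if c = '(' then rbInner rest [] else rbOuter rest

def rbInner : List Char → List Char → List String
  | [], _ => []
  | c :: rest, cap =>
    if c = ')' then
      if String.ofList cap ∈ phenomena then rbOuter rest
      else String.ofList cap :: rbOuter rest
    else rbInner rest (if c = '(' then cap else cap ++ [c])
end

def round_brackets_alt (string_to_process : String) : List String :=
  rbOuter string_to_process.toList

-- ===== PRECONDITION & SPEC =====
def Spec_round_brackets (string_to_process : String) (out : List String) : Prop := out = round_brackets_alt string_to_process
instance (string_to_process : String) (out : List String) : Decidable (Spec_round_brackets string_to_process out) := by unfold Spec_round_brackets; infer_instance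

-- ===== CLAIM (what is proved, stated in full; the proofs are below) =====
def Claim_equal_round_brackets : Prop := ∀ (string_to_process : String), Dom_round_brackets string_to_process → Spec_round_brackets string_to_process (round_brackets string_to_process)

-- ===== LEMMAS AND PROOFS =====

-- A's loop from flag = False (ps must be []) behaves like rbOuter, and from
-- flag = True with accumulator cap like rbInner; joint induction on the fuel n.
theorem rb_key (n : Nat) : ∀ cs : List Char, cs.length ≤ n →
    (∀ fls, (List.foldl rbStep (fls, false, ([] : List Char)) cs).1 = fls ++ rbOuter cs) ∧
    (∀ fls cap, (List.foldl rbStep (fls, true, cap) cs).1 = fls ++ rbInner cs cap) := by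
  induction n with
  | zero =>
    intro cs h
    have hnil : cs = [] := by cases cs <;> simp_all
    subst hnil
    exact ⟨fun fls => by simp [rbOuter], fun fls cap => by simp [rbInner]⟩
  | succ n ih =>
    intro cs h
    cases cs with
    | nil => exact ⟨fun fls => by simp [rbOuter], fun fls cap => by simp [rbInner]⟩
    | cons c rest =>
      have hr := ih rest (by simp at h; omega)
      constructor
      · intro fls
        by_cases hc : c = '('
        · subst hc
          simpa [List.foldl, rbStep, rbOuter] using hr.2 fls []
        · simpa [List.foldl, rbStep, hc, rbOuter] using hr.1 fls
      · intro fls cap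
        by_cases hc : c = ')'
        · subst hc
          by_cases hp : String.ofList cap ∈ phenomena
          · simpa [List.foldl, rbStep, rbInner, hp] using hr.1 fls
          · simpa [List.foldl, rbStep, rbInner, hp] using hr.1 (fls ++ [String.ofList cap])
        · by_cases ho : c = '('
          · subst ho
            simpa [List.foldl, rbStep, rbInner] using hr.2 fls cap
          · simpa [List.foldl, rbStep, hc, ho, rbInner] using hr.2 fls (cap ++ [c])

-- ===== VERDICT (by name: the statement is the Claim_ definition above) =====
theorem round_brackets_spec : Claim_equal_round_brackets := by
  intro s _
  unfold Spec_round_brackets round_brackets round_brackets_alt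
  exact (rb_key s.toList.length s.toList le_rfl).1 []
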